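-- pv_equiv track=rewrite | github.com/Mohammad-Toseef/Cryptography | algorithm/dictionary/chall-06.py | delete_key_having_value
-- ===== SOURCE A (Python) =====
-- def delete_key_having_value(dictionary, value):
--     keys_to_delete = []
--     for Key in dictionary.keys():
--         if dictionary[Key] == value:
--             keys_to_delete.append(Key)
--     for Key in keys_to_delete:
--         dictionary.pop(Key)
--     return dictionary
-- ===== SOURCE B (Python) =====
-- def delete_key_having_value(dictionary, value):
--     kept = {k: v for k, v in dictionary.items() if not (v == value)}
--     dictionary.clear()
--     dictionary.update(kept)
--     return dictionary
-- ===== Notes on version B (the rewrite author's own statement) =====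
-- stated objective: simpler
-- what changed: Replaces the two-pass collect-keys-then-pop deletion with a single-pass comprehension that rebuilds the surviving items, then clear()+update() puts them back into the same dict object.
import Mathlib
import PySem

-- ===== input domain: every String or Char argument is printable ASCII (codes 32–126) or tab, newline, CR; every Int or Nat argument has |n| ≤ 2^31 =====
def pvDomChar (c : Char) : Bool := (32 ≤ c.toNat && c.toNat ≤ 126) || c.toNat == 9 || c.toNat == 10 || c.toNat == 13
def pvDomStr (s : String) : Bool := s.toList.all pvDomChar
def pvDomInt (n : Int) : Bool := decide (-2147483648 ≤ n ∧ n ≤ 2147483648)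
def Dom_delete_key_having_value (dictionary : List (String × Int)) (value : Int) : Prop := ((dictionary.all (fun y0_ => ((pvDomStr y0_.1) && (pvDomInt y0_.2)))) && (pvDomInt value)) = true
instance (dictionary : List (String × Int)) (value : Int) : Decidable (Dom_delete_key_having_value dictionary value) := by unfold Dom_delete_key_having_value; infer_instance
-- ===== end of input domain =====

-- B rebuilds the surviving items in one comprehension pass and bulk-replaces the dict's
-- contents (simpler decomposition); equivalence proved on the return value (both mutate
-- the argument dict to the same final contents).

-- ===== PORT A =====
-- the input dict arrives as an association list; Python's dict construction keeps the
-- first position / last value per key, which is exactly PySem.Dict.ofList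
def delete_key_having_value (dictionary : List (String × Int)) (value : Int) : List (String × Int) :=
  let d := PySem.Dict.ofList dictionary
  -- for Key in dictionary.keys(): if dictionary[Key] == value: keys_to_delete.append(Key)
  -- (dictionary[Key] cannot raise: Key ∈ d.keys, so getD's default 0 is never used)
  let keys_to_delete := d.keys.foldl (fun acc k => if d.getD k 0 == value then acc ++ [k] else acc) []
  -- for Key in keys_to_delete: dictionary.pop(Key)
  let d' := keys_to_delete.foldl (fun dd k => dd.erase k) d
  d'.items

-- ===== PORT B =====
def delete_key_having_value_alt (dictionary : List (String × Int)) (value : Int) : List (String × Int) :=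
  let d := PySem.Dict.ofList dictionary
  -- kept = {k: v for k, v in dictionary.items() if not (v == value)}
  let kept := PySem.Dict.ofList (d.items.filter (fun kv => !(kv.2 == value)))
  -- dictionary.clear(); dictionary.update(kept); return dictionary
  kept.items

-- ===== PRECONDITION & SPEC =====
def Spec_delete_key_having_value (dictionary : List (String × Int)) (value : Int) (out : List (String × Int)) : Prop := out = delete_key_having_value_alt dictionary value
instance (dictionary : List (String × Int)) (value : Int) (out : List (String × Int)) : Decidable (Spec_delete_key_having_value dictionary value out) := by unfold Spec_delete_key_having_value; infer_instance

-- ===== CLAIM (what is proved, stated in full; the proofs are below) =====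
def Claim_equal_delete_key_having_value : Prop := ∀ (dictionary : List (String × Int)) (value : Int), Dom_delete_key_having_value dictionary value → Spec_delete_key_having_value dictionary value (delete_key_having_value dictionary value)

-- ===== LEMMAS AND PROOFS =====

-- ofList is the identity on a list whose keys are already distinct
theorem ofList_items_of_nodup {κ ν : Type} [BEq κ] [LawfulBEq κ]
    (l : List (κ × ν)) (h : (l.map Prod.fst).Nodup) :
    (PySem.Dict.ofList l).items = l := by
  have := PySem.Dict.items_foldl_insert_fresh (κ := κ) (ν := ν) l Prod.fst Prod.snd
      PySem.Dict.empty (by intro a _; rfl) h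
  simpa [PySem.Dict.ofList, PySem.Dict.update] using this

-- folding erase over a key list filters the items by non-membership
theorem foldl_erase_items {κ ν : Type} [BEq κ] [LawfulBEq κ]
    (K : List κ) (d : PySem.Dict κ ν) :
    (K.foldl (fun dd k => dd.erase k) d).items
      = d.items.filter (fun p => decide (p.1 ∉ K)) := by
  induction K generalizing d with
  | nil => simp
  | cons k K ih =>
      rw [List.foldl_cons, ih]
      show (d.items.filter (fun p => !(p.1 == k))).filter (fun p => decide (p.1 ∉ K))
            = d.items.filter (fun p => decide (p.1 ∉ k :: K))
      rw [List.filter_filter]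
      apply List.filter_congr
      intro p _
      by_cases h1 : p.1 = k <;> simp [h1]

theorem delete_eq_filter (dictionary : List (String × Int)) (value : Int) :
    delete_key_having_value dictionary value
      = (PySem.Dict.ofList dictionary).items.filter (fun kv => !(kv.2 == value)) := by
  unfold delete_key_having_value
  set d := PySem.Dict.ofList dictionary with hd
  have hnd : d.keys.Nodup := PySem.Dict.nodup_keys_ofList dictionary
  show ((d.keys.foldl (fun acc k => if d.getD k 0 == value then acc ++ [id k] else acc) []).foldl
          (fun dd k => dd.erase k) d).items
        = d.items.filter (fun kv => !(kv.2 == value))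
  rw [PySem.List.foldl_append_if (fun k => d.getD k 0 == value) id d.keys [],
      foldl_erase_items]
  apply List.filter_congr
  intro p hp
  obtain ⟨k, v⟩ := p
  have hget : d.getD k 0 = v := PySem.Dict.getD_of_mem_items d hp hnd 0
  by_cases hv : v = value
  · have hkmem : k ∈ d.keys := by
      simpa [PySem.Dict.keys] using List.mem_map_of_mem (f := Prod.fst) hp
    simp [List.mem_filter, hget, hv, hkmem]
  · simp [List.mem_filter, hget, hv]

-- ===== VERDICT (by name: the statement is the Claim_ definition above) =====
theorem delete_key_having_value_spec : Claim_equal_delete_key_having_value := by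
  intro dictionary value _
  unfold Spec_delete_key_having_value delete_key_having_value_alt
  rw [delete_eq_filter]
  have hnd : (PySem.Dict.ofList dictionary).keys.Nodup := PySem.Dict.nodup_keys_ofList dictionary
  have hsub : (((PySem.Dict.ofList dictionary).items.filter (fun kv => !(kv.2 == value))).map Prod.fst).Sublist
      ((PySem.Dict.ofList dictionary).items.map Prod.fst) :=
    List.Sublist.map Prod.fst (List.filter_sublist)
  exact (ofList_items_of_nodup _ (hnd.sublist hsub)).symm
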